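-- pv_equiv track=rewrite | github.com/couchbase/testrunner | pytests/fts/random_query_generator/rand_query_gen.py | get_self_intersect_vertices
-- ===== SOURCE A (Python) =====
-- def get_self_intersect_vertices(verts):
--     mod_verts = []
--     mid_vert = int((len(verts) - 1) / 2)
--
--     mod_verts.append(verts[0])
--     mod_verts.append(verts[mid_vert])
--
--     x = 1
--
--     while (mid_vert + x) < (len(verts) - 1):
--         mod_verts.append(verts[mid_vert + x])
--         mod_verts.append(verts[mid_vert - x])
--         x += 1
--
--     mod_verts.append(verts[len(verts) - 1])
--
--     return mod_verts
-- ===== SOURCE B (Python) =====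
-- def get_self_intersect_vertices(verts):
--     n = len(verts)
--     mid = (n - 1) // 2
--     steps = max(n - mid - 1, 1)
--
--     def index_at(k):
--         if k == 0:
--             return 0
--         if k == 2 * steps:
--             return n - 1
--         if k % 2 == 0:
--             return mid + k // 2
--         return mid - k // 2
--
--     return [verts[index_at(k)] for k in range(2 * steps + 1)]
-- ===== Notes on version B (the rewrite author's own statement) =====
-- stated objective: alternative
-- what changed: Replaces A's two-directional while loop walking outward from the middle with a closed-form position-to-index formula mapped over all output positions in one forward pass.
import Mathlib
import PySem

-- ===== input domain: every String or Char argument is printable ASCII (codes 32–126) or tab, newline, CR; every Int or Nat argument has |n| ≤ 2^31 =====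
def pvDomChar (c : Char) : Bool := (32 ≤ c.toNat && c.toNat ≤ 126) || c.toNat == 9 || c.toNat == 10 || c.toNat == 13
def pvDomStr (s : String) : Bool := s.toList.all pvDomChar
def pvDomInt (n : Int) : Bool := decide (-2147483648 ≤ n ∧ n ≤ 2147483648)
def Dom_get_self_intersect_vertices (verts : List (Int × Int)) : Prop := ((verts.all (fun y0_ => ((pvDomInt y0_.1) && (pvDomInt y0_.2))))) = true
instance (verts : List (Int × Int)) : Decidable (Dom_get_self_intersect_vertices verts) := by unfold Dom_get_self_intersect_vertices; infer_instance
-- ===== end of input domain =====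

-- B computes each output position's source index by a closed-form arithmetic formula and maps
-- it over range(output length), instead of A's stateful two-directional while loop; alternative
-- decomposition, same cost.

-- ===== PORT A =====
-- Inside Pre_ (verts ≠ []) every index A reads is in range, so pyGetD's default is never hit.
def gsiLoop (verts : List (Int × Int)) (mid : Int) (x : Int) (acc : List (Int × Int)) :
    List (Int × Int) :=
  if _h : mid + x < (verts.length : Int) - 1 then
    gsiLoop verts mid (x + 1)
      (acc ++ [PySem.List.pyGetD verts (mid + x) (0, 0),
               PySem.List.pyGetD verts (mid - x) (0, 0)])
  else acc
termination_by ((verts.length : Int) - 1 - mid - x).toNat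
decreasing_by omega

def get_self_intersect_vertices (verts : List (Int × Int)) : List (Int × Int) :=
  -- int((len(verts) - 1) / 2): truncation toward zero, exact as Int.tdiv
  let mid : Int := Int.tdiv ((verts.length : Int) - 1) 2
  gsiLoop verts mid 1
    [PySem.List.pyGetD verts 0 (0, 0), PySem.List.pyGetD verts mid (0, 0)]
    ++ [PySem.List.pyGetD verts ((verts.length : Int) - 1) (0, 0)]

-- ===== PORT B =====
-- index_at(k) from Source B: the source index for output position k, in closed form.
def gsiIndexAt (n mid steps k : Int) : Int :=
  if k = 0 then 0
  else if k = 2 * steps then n - 1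
  else if PySem.Int.mod k 2 = 0 then mid + PySem.Int.floordiv k 2
  else mid - PySem.Int.floordiv k 2

def get_self_intersect_vertices_alt (verts : List (Int × Int)) : List (Int × Int) :=
  let n : Int := verts.length
  let mid : Int := PySem.Int.floordiv (n - 1) 2
  let steps : Int := max (n - mid - 1) 1
  (PySem.List.pyRange 0 (2 * steps + 1) 1).map
    (fun k => PySem.List.pyGetD verts (gsiIndexAt n mid steps k) (0, 0))

-- ===== PRECONDITION & SPEC =====
-- Pre_ excludes only the empty list, on which A raises IndexError (verts[0]).
def Pre_get_self_intersect_vertices (verts : List (Int × Int)) : Prop := verts ≠ []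
instance (verts : List (Int × Int)) : Decidable (Pre_get_self_intersect_vertices verts) := by
  unfold Pre_get_self_intersect_vertices; infer_instance

def pvWitness_get_self_intersect_vertices : (List (Int × Int)) := [(1, 2), (3, 4), (5, 6)]

def Spec_get_self_intersect_vertices (verts : List (Int × Int)) (out : List (Int × Int)) : Prop :=
  out = get_self_intersect_vertices_alt verts
instance (verts : List (Int × Int)) (out : List (Int × Int)) :
    Decidable (Spec_get_self_intersect_vertices verts out) := by
  unfold Spec_get_self_intersect_vertices; infer_instance

-- ===== CLAIM (what is proved, stated in full; the proofs are below) =====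
def Claim_equal_get_self_intersect_vertices : Prop :=
  ∀ (verts : List (Int × Int)), Dom_get_self_intersect_vertices verts →
    Pre_get_self_intersect_vertices verts →
    Spec_get_self_intersect_vertices verts (get_self_intersect_vertices verts)

-- ===== LEMMAS AND PROOFS =====

-- A's loop, started at any counter x, appends exactly the pairs (mid+j, mid-j) for j = x .. s-1,
-- where s = len - 1 - mid.
theorem gsiLoop_eq_flatMap (verts : List (Int × Int)) (mid : Int) :
    ∀ (x : Int) (acc : List (Int × Int)),
      gsiLoop verts mid x acc =
        acc ++ (PySem.List.pyRange x ((verts.length : Int) - 1 - mid) 1).flatMap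
          (fun j => [PySem.List.pyGetD verts (mid + j) (0, 0),
                     PySem.List.pyGetD verts (mid - j) (0, 0)]) := by
  intro x acc
  induction x, acc using gsiLoop.induct verts mid with
  | case1 x acc h ih =>
    rw [gsiLoop]
    simp only [h, dif_pos]
    rw [PySem.List.pyRange_one_cons (by omega : x < (verts.length : Int) - 1 - mid)]
    rw [ih]
    simp
  | case2 x acc h =>
    rw [gsiLoop]
    simp only [h, dif_neg, not_false_iff]
    rw [PySem.List.pyRange_one_eq_nil (by omega)]
    simp

-- B's interior positions 2j+1 .. 2s-1 map, via the index formula, to the same pair sequence.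
theorem gsiAlt_middle (verts : List (Int × Int)) (n mid s : Int)
    (_hn : n = (verts.length : Int)) (_hs1 : 1 ≤ s) :
    ∀ (t : Nat) (j : Int), 0 ≤ j → j + t + 1 = s →
      (PySem.List.pyRange (2 * j + 1) (2 * s) 1).map
          (fun k => PySem.List.pyGetD verts (gsiIndexAt n mid s k) (0, 0)) =
        PySem.List.pyGetD verts (mid - j) (0, 0) ::
          (PySem.List.pyRange (j + 1) s 1).flatMap
            (fun i => [PySem.List.pyGetD verts (mid + i) (0, 0),
                       PySem.List.pyGetD verts (mid - i) (0, 0)]) := by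
  intro t
  induction t with
  | zero =>
    intro j hj hjs
    rw [PySem.List.pyRange_one_cons (by omega : 2 * j + 1 < 2 * s),
        PySem.List.pyRange_one_eq_nil (by omega : 2 * s ≤ 2 * j + 1 + 1),
        PySem.List.pyRange_one_eq_nil (by omega : s ≤ j + 1)]
    simp only [List.map_cons, List.map_nil, List.flatMap_nil]
    congr 2
    unfold gsiIndexAt
    rw [if_neg (by omega), if_neg (by omega),
        PySem.Int.mod_eq_emod_of_pos (by norm_num),
        PySem.Int.floordiv_eq_ediv_of_pos (by norm_num)]
    rw [if_neg (by omega)]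
    omega
  | succ t ih =>
    intro j hj hjs
    rw [PySem.List.pyRange_one_cons (by omega : 2 * j + 1 < 2 * s),
        PySem.List.pyRange_one_cons (by omega : 2 * j + 1 + 1 < 2 * s),
        PySem.List.pyRange_one_cons (by omega : j + 1 < s)]
    have hmid : (2 * j + 1 + 1 : Int) = 2 * (j + 1) + 1 - 1 := by ring
    simp only [List.map_cons]
    have h3 : (2 * (j + 1) + 1 : Int) = 2 * j + 1 + 1 + 1 := by ring
    rw [← h3, ih (j + 1) (by omega) (by omega)]
    simp only [List.flatMap_cons]
    congr 1
    · congr 1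
      unfold gsiIndexAt
      rw [if_neg (by omega), if_neg (by omega),
          PySem.Int.mod_eq_emod_of_pos (by norm_num),
          PySem.Int.floordiv_eq_ediv_of_pos (by norm_num)]
      rw [if_neg (by omega)]
      omega
    · congr 2
      unfold gsiIndexAt
      rw [if_neg (by omega), if_neg (by omega),
          PySem.Int.mod_eq_emod_of_pos (by norm_num),
          PySem.Int.floordiv_eq_ediv_of_pos (by norm_num)]
      rw [if_pos (by omega)]
      omega

-- ===== VERDICT (by name: the statement is the Claim_ definition above) =====
theorem get_self_intersect_vertices_spec : Claim_equal_get_self_intersect_vertices := by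
  intro verts _hdom hpre
  have hn : 1 ≤ (verts.length : Int) := by
    have := List.length_pos_iff.mpr hpre; exact_mod_cast this
  unfold Spec_get_self_intersect_vertices
  simp only [get_self_intersect_vertices, get_self_intersect_vertices_alt]
  set n : Int := (verts.length : Int) with hndef
  have hmid : Int.tdiv (n - 1) 2 = PySem.Int.floordiv (n - 1) 2 := by
    rw [PySem.Int.floordiv_eq_ediv_of_pos (by omega),
        Int.tdiv_eq_ediv_of_nonneg (by omega)]
  rw [hmid]
  set mid := PySem.Int.floordiv (n - 1) 2 with hmiddef
  have hmideq : mid = (n - 1) / 2 := by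
    rw [hmiddef, PySem.Int.floordiv_eq_ediv_of_pos (by omega)]
  by_cases h1 : n = 1
  · -- verts is a singleton: both sides are [v0, v0, v0]
    have hsteps : max (n - mid - 1) 1 = 1 := by omega
    rw [hsteps, gsiLoop_eq_flatMap]
    rw [PySem.List.pyRange_one_eq_nil (by omega : n - 1 - mid ≤ 1)]
    have h3 : PySem.List.pyRange 0 (2 * 1 + 1) 1 = [0, 1, 2] := by decide
    rw [h3]
    simp only [List.flatMap_nil, List.append_nil, List.map_cons, List.map_nil]
    have i0 : gsiIndexAt n mid 1 0 = 0 := by unfold gsiIndexAt; rw [if_pos rfl]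
    have i1 : gsiIndexAt n mid 1 1 = mid := by
      unfold gsiIndexAt
      rw [if_neg (by norm_num), if_neg (by norm_num),
          PySem.Int.mod_eq_emod_of_pos (by norm_num), if_neg (by norm_num),
          PySem.Int.floordiv_eq_ediv_of_pos (by norm_num)]
      norm_num
    have i2 : gsiIndexAt n mid 1 2 = n - 1 := by
      unfold gsiIndexAt; rw [if_neg (by norm_num), if_pos (by norm_num)]
    rw [i0, i1, i2]
    have hm0 : mid = 0 := by omega
    simp [hm0, h1]
  · -- n ≥ 2: steps = n - mid - 1 ≥ 1
    have hn2 : 2 ≤ n := by omega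
    have hsge : 1 ≤ n - mid - 1 := by omega
    have hsteps : max (n - mid - 1) 1 = n - mid - 1 := by omega
    rw [hsteps]
    set s : Int := n - mid - 1 with hsdef
    rw [gsiLoop_eq_flatMap]
    have hrange : PySem.List.pyRange 0 (2 * s + 1) 1 =
        0 :: (PySem.List.pyRange 1 (2 * s) 1 ++ [2 * s]) := by
      rw [PySem.List.pyRange_one_cons (by omega : (0 : Int) < 2 * s + 1)]
      congr 1
      rw [show (0 : Int) + 1 = 1 from by norm_num]
      exact PySem.List.pyRange_one_succ_right (by omega)
    rw [hrange]
    simp only [List.map_cons, List.map_append, List.map_cons, List.map_nil]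
    have hrange2 : (PySem.List.pyRange 1 (2 * s) 1).map
        (fun k => PySem.List.pyGetD verts (gsiIndexAt n mid s k) (0, 0)) =
        PySem.List.pyGetD verts mid (0, 0) ::
          (PySem.List.pyRange 1 s 1).flatMap
            (fun i => [PySem.List.pyGetD verts (mid + i) (0, 0),
                       PySem.List.pyGetD verts (mid - i) (0, 0)]) := by
      have := gsiAlt_middle verts n mid s rfl hsge (s - 1).toNat 0 (by omega) (by omega)
      simpa using this
    rw [hrange2]
    have hidx0 : gsiIndexAt n mid s 0 = 0 := by unfold gsiIndexAt; rw [if_pos rfl]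
    have hidxlast : gsiIndexAt n mid s (2 * s) = n - 1 := by
      unfold gsiIndexAt
      rw [if_neg (by omega), if_pos rfl]
    rw [hidx0, hidxlast]
    have hs : n - 1 - mid = s := by omega
    rw [hs]
    simp
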